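-- pv_equiv track=rewrite | github.com/dnml101152/process_tool | rule_widget.py | logical_tokenize
-- ===== SOURCE A (Python) =====
-- LOGICAL_OPERATORS = {'$NOT', '$AND', '$OR'}
--
-- def logical_tokenize(input_str):
--     tokens = []
--     pos = 0
--     length = len(input_str)
--
--     while pos < length:
--         # Skip whitespace
--         if input_str[pos].isspace():
--             pos += 1
--             continue
--
--         # Logical operators
--         for op in LOGICAL_OPERATORS:
--             if input_str.startswith(op, pos):
--                 tokens.append(('OPERATOR', op))
--                 pos += len(op)
--                 break
--         else:
--             if input_str[pos] == '(':
--                 tokens.append(('LPAREN', '('))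
--                 pos += 1
--                 continue
--             if input_str[pos] == ')':
--                 tokens.append(('RPAREN', ')'))
--                 pos += 1
--                 continue
--             if input_str[pos] == ',':
--                 tokens.append(('COMMA', ','))
--                 pos += 1
--                 continue
--
--             # Condition delimited by '?'
--             if input_str[pos] == '?':
--                 end_pos = input_str.find('?', pos + 1)
--                 if end_pos == -1:
--                     raise SyntaxError("Unterminated condition (missing closing '?')")
--                 cond = input_str[pos+1:end_pos].strip()
--                 tokens.append(('CONDITION', cond))
--                 pos = end_pos + 1
--                 continue
--
--             raise SyntaxError(f"Unexpected character {input_str[pos]} at position {pos}")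
--
--     return tokens
-- ===== SOURCE B (Python) =====
-- import re
--
-- _TOKEN_RE = re.compile(r"(\s+)|(\$NOT|\$AND|\$OR)|(\()|(\))|(,)|\?([^?]*)\?")
--
-- def logical_tokenize(input_str):
--     tokens = []
--     pos = 0
--     n = len(input_str)
--     while pos < n:
--         m = _TOKEN_RE.match(input_str, pos)
--         if m is None:
--             if input_str[pos] == '?':
--                 raise SyntaxError("Unterminated condition (missing closing '?')")
--             raise SyntaxError(f"Unexpected character {input_str[pos]} at position {pos}")
--         if m.group(1) is None:
--             if m.group(2) is not None:
--                 tokens.append(('OPERATOR', m.group(2)))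
--             elif m.group(3) is not None:
--                 tokens.append(('LPAREN', '('))
--             elif m.group(4) is not None:
--                 tokens.append(('RPAREN', ')'))
--             elif m.group(5) is not None:
--                 tokens.append(('COMMA', ','))
--             else:
--                 tokens.append(('CONDITION', m.group(6).strip()))
--         pos = m.end()
--     return tokens
-- ===== Notes on version B (the rewrite author's own statement) =====
-- stated objective: idiomatic
-- what changed: Replaces A's hand-written per-character branch cascade (with a per-character whitespace skip and a manual find for the closing '?') by one compiled master regex with a group per token kind, matched repeatedly at the current position; token choice is by matched group and whitespace runs are consumed in one match.
import Mathlib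
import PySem

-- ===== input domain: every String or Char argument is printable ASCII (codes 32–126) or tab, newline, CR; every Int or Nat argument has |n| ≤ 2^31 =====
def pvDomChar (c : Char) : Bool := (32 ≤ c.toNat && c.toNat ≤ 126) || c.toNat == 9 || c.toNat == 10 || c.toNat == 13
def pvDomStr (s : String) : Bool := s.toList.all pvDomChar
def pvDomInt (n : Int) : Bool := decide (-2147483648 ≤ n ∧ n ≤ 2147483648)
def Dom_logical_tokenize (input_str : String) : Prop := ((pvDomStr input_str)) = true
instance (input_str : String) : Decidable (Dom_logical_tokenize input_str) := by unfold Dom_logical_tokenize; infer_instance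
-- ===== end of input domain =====

-- B replaces A's per-character branch cascade by a single master-pattern matcher applied
-- repeatedly at the current position (objective: idiomatic). Equivalence is about the
-- return value on inputs where A returns; where A raises SyntaxError, B raises the same
-- SyntaxError (excluded by Pre_). On the ASCII domain above, regex \s coincides with
-- str.isspace, so both ports use PySem.Chars.isspace.

-- ===== PORT A =====
-- literal port of A's while-loop: one character / operator / condition handled per step
def goA (cs : List Char) (pos : Nat) (acc : List (String × String)) :
    List (String × String) :=
  if h : pos < cs.length then
    if PySem.Chars.isspace cs[pos] then goA cs (pos + 1) acc
    else if PySem.Chars.startswith (cs.drop pos) ['$','N','O','T'] then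
      goA cs (pos + 4) (acc ++ [("OPERATOR", "$NOT")])
    else if PySem.Chars.startswith (cs.drop pos) ['$','A','N','D'] then
      goA cs (pos + 4) (acc ++ [("OPERATOR", "$AND")])
    else if PySem.Chars.startswith (cs.drop pos) ['$','O','R'] then
      goA cs (pos + 3) (acc ++ [("OPERATOR", "$OR")])
    else if cs[pos] = '(' then goA cs (pos + 1) (acc ++ [("LPAREN", "(")])
    else if cs[pos] = ')' then goA cs (pos + 1) (acc ++ [("RPAREN", ")")])
    else if cs[pos] = ',' then goA cs (pos + 1) (acc ++ [("COMMA", ",")])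
    else if cs[pos] = '?' then
      let e := PySem.Chars.findFrom cs ['?'] ((pos : Int) + 1) none
      if he : e = -1 then []  -- SyntaxError "Unterminated condition" (outside Pre_)
      else
        goA cs (e.toNat + 1)
          (acc ++ [("CONDITION",
            String.ofList (PySem.Chars.strip
              (PySem.List.slice cs (some ((pos : Int) + 1)) (some e))))])
    else []  -- SyntaxError "Unexpected character" (outside Pre_)
  else acc
termination_by cs.length - pos
decreasing_by
  all_goals try omega
  · -- '?' branch: the found closing '?' is at index ≥ pos + 1
    have hk : pos + 1 ≤ cs.length := by omega
    have hs := PySem.Chars.findFrom_natCast_spec cs ['?'] (pos + 1) hk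
    have hcast : ((pos : Int) + 1) = ((pos + 1 : Nat) : Int) := by push_cast; ring
    have he' : PySem.Chars.findFrom cs ['?'] ((pos : Int) + 1) none ≠ -1 := he
    rw [hcast] at he' ⊢
    have := (hs he').1
    omega

def logical_tokenize (input_str : String) : List (String × String) :=
  goA input_str.toList 0 []

-- ===== PORT B =====
-- the master pattern (\s+)|(\$NOT|\$AND|\$OR)|(\()|(\))|(,)|\?([^?]*)\? matched at pos:
-- none = no match (SyntaxError); some (tok?, end) = matched, tok? none for whitespace
def matchAtB (cs : List Char) (pos : Nat) : Option (Option (String × String) × Nat) :=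
  let rest := cs.drop pos
  let ws := rest.takeWhile (fun c => PySem.Chars.isspace c)
  if ws.length ≠ 0 then some (none, pos + ws.length)
  else if PySem.Chars.startswith rest ['$','N','O','T'] then
    some (some ("OPERATOR", "$NOT"), pos + 4)
  else if PySem.Chars.startswith rest ['$','A','N','D'] then
    some (some ("OPERATOR", "$AND"), pos + 4)
  else if PySem.Chars.startswith rest ['$','O','R'] then
    some (some ("OPERATOR", "$OR"), pos + 3)
  else
    match rest.head? with
    | some '(' => some (some ("LPAREN", "("), pos + 1)
    | some ')' => some (some ("RPAREN", ")"), pos + 1)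
    | some ',' => some (some ("COMMA", ","), pos + 1)
    | some '?' =>
      let body := rest.tail.takeWhile (fun d => d ≠ '?')
      if body.length < rest.tail.length then
        some (some ("CONDITION", String.ofList (PySem.Chars.strip body)),
              pos + 2 + body.length)
      else none
    | _ => none

-- every match consumes at least one character (used for goB's termination)
lemma matchAtB_lt (cs : List Char) (pos : Nat) (t : Option (String × String)) (p' : Nat)
    (hm : matchAtB cs pos = some (t, p')) : pos < p' := by
  unfold matchAtB at hm
  dsimp only at hm
  split at hm
  · rename_i h; simp only [Option.some.injEq, Prod.mk.injEq] at hm; omega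
  split at hm
  · simp only [Option.some.injEq, Prod.mk.injEq] at hm; omega
  split at hm
  · simp only [Option.some.injEq, Prod.mk.injEq] at hm; omega
  split at hm
  · simp only [Option.some.injEq, Prod.mk.injEq] at hm; omega
  split at hm <;> (try simp_all)
  all_goals omega

def goB (cs : List Char) (pos : Nat) (acc : List (String × String)) :
    List (String × String) :=
  if h : pos < cs.length then
    match hm : matchAtB cs pos with
    | none => []  -- SyntaxError (outside Pre_)
    | some (tok?, p') =>
      goB cs p' (match tok? with | none => acc | some t => acc ++ [t])
  else acc
termination_by cs.length - pos
decreasing_by have := matchAtB_lt cs pos tok? p' hm; omega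

def logical_tokenize_alt (input_str : String) : List (String × String) :=
  goB input_str.toList 0 []

-- ===== PRECONDITION & SPEC =====
-- 5-state automaton accepting (whitespace | $NOT | $AND | $OR | '(' | ')' | ',' | '?'…'?')*
inductive TkSt
  | normal | afterDollar | inCond
  | expect2 : Char → Char → TkSt
  | expect1 : Char → TkSt
deriving DecidableEq

def tkStep : TkSt → Char → Option TkSt
  | TkSt.normal, c =>
    if PySem.Chars.isspace c || c == '(' || c == ')' || c == ',' then some TkSt.normal
    else if c == '$' then some TkSt.afterDollar
    else if c == '?' then some TkSt.inCond
    else none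
  | TkSt.afterDollar, c =>
    if c == 'N' then some (TkSt.expect2 'O' 'T')
    else if c == 'A' then some (TkSt.expect2 'N' 'D')
    else if c == 'O' then some (TkSt.expect1 'R')
    else none
  | TkSt.expect2 a b, c => if c == a then some (TkSt.expect1 b) else none
  | TkSt.expect1 a, c => if c == a then some TkSt.normal else none
  | TkSt.inCond, c => if c == '?' then some TkSt.normal else some TkSt.inCond

def tkOk : TkSt → List Char → Bool
  | TkSt.normal, [] => true
  | _, [] => false
  | st, c :: r => match tkStep st c with | none => false | some st' => tkOk st' r

-- Pre_ excludes exactly the inputs on which A raises SyntaxError (unexpected character,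
-- or unterminated '?' condition); B raises the same SyntaxError there.
def Pre_logical_tokenize (input_str : String) : Prop :=
  tkOk TkSt.normal input_str.toList = true
instance (input_str : String) : Decidable (Pre_logical_tokenize input_str) := by
  unfold Pre_logical_tokenize; infer_instance

def pvWitness_logical_tokenize : String := "$NOT ( ? a>1 ? , ?b? )\t$AND $OR"

def Spec_logical_tokenize (input_str : String) (out : List (String × String)) : Prop :=
  out = logical_tokenize_alt input_str
instance (input_str : String) (out : List (String × String)) :
    Decidable (Spec_logical_tokenize input_str out) := by
  unfold Spec_logical_tokenize; infer_instance

-- ===== CLAIM (what is proved, stated in full; the proofs are below) =====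
def Claim_equal_logical_tokenize : Prop :=
  ∀ (input_str : String), Dom_logical_tokenize input_str →
    Pre_logical_tokenize input_str →
    Spec_logical_tokenize input_str (logical_tokenize input_str)

-- ===== LEMMAS AND PROOFS =====

-- the DFA of Pre_ agrees with the recursive grammar acceptor okTok
lemma tkOk_inCond (l : List Char) :
    tkOk TkSt.inCond l =
      if (l.takeWhile (fun d => d ≠ '?')).length < l.length then
        tkOk TkSt.normal (l.drop ((l.takeWhile (fun d => d ≠ '?')).length + 1))
      else false := by
  induction l with
  | nil => simp [tkOk]
  | cons c r ih =>
    by_cases hq : c = '?'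
    · subst hq
      simp [tkOk, tkStep, List.takeWhile_cons]
    · rw [show tkOk TkSt.inCond (c :: r) = tkOk TkSt.inCond r by
        simp [tkOk, tkStep, hq]]
      rw [ih]
      have htw : List.takeWhile (fun d => decide (d ≠ '?')) (c :: r)
          = c :: List.takeWhile (fun d => decide (d ≠ '?')) r := by
        simp [List.takeWhile_cons, hq]
      rw [htw]
      simp only [List.length_cons]
      split_ifs with h1 h2 <;> first
        | omega
        | rfl

lemma tkOk_afterDollar (l : List Char) :
    tkOk TkSt.afterDollar l =
      (if PySem.Chars.startswith l ['N','O','T'] then tkOk TkSt.normal (l.drop 3)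
       else if PySem.Chars.startswith l ['A','N','D'] then tkOk TkSt.normal (l.drop 3)
       else if PySem.Chars.startswith l ['O','R'] then tkOk TkSt.normal (l.drop 2)
       else false) := by
  rcases l with _ | ⟨a, l1⟩
  · simp [tkOk, PySem.Chars.startswith, List.isPrefixOf]
  by_cases ha : a = 'N'
  · subst ha
    rcases l1 with _ | ⟨b, l2⟩
    · simp [tkOk, tkStep, PySem.Chars.startswith, List.isPrefixOf]
    by_cases hb : b = 'O'
    · subst hb
      rcases l2 with _ | ⟨d, l3⟩
      · simp [tkOk, tkStep, PySem.Chars.startswith, List.isPrefixOf]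
      by_cases hd : d = 'T'
      · subst hd
        simp [tkOk, tkStep, PySem.Chars.startswith, List.isPrefixOf]
      · have hd' : ('T' == d) = false := by simp [Ne.symm hd]
        simp [tkOk, tkStep, PySem.Chars.startswith, List.isPrefixOf, hd', hd]
    · have hb' : ('O' == b) = false := by simp [Ne.symm hb]
      simp [tkOk, tkStep, PySem.Chars.startswith, List.isPrefixOf, hb', hb]
  · by_cases ha2 : a = 'A'
    · subst ha2
      rcases l1 with _ | ⟨b, l2⟩
      · simp [tkOk, tkStep, PySem.Chars.startswith, List.isPrefixOf]
      by_cases hb : b = 'N'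
      · subst hb
        rcases l2 with _ | ⟨d, l3⟩
        · simp [tkOk, tkStep, PySem.Chars.startswith, List.isPrefixOf]
        by_cases hd : d = 'D'
        · subst hd
          simp [tkOk, tkStep, PySem.Chars.startswith, List.isPrefixOf]
        · have hd' : ('D' == d) = false := by simp [Ne.symm hd]
          simp [tkOk, tkStep, PySem.Chars.startswith, List.isPrefixOf, hd', hd]
      · have hb' : ('N' == b) = false := by simp [Ne.symm hb]
        simp [tkOk, tkStep, PySem.Chars.startswith, List.isPrefixOf, hb', hb]
    · by_cases ha3 : a = 'O'
      · subst ha3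
        rcases l1 with _ | ⟨b, l2⟩
        · simp [tkOk, tkStep, PySem.Chars.startswith, List.isPrefixOf]
        by_cases hb : b = 'R'
        · subst hb
          simp [tkOk, tkStep, PySem.Chars.startswith, List.isPrefixOf]
        · have hb' : ('R' == b) = false := by simp [Ne.symm hb]
          simp [tkOk, tkStep, PySem.Chars.startswith, List.isPrefixOf, hb', hb]
      · have h1 : ('N' == a) = false := by simp [Ne.symm ha]
        have h2 : ('A' == a) = false := by simp [Ne.symm ha2]
        have h3 : ('O' == a) = false := by simp [Ne.symm ha3]
        simp [tkOk, tkStep, PySem.Chars.startswith, List.isPrefixOf, h1, h2, h3,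
          ha, ha2, ha3]

-- one step of goB when the master pattern matches (whitespace / token forms)
lemma goB_step_none (cs : List Char) (pos p' : Nat) (acc : List (String × String))
    (h : pos < cs.length) (hm : matchAtB cs pos = some (none, p')) :
    goB cs pos acc = goB cs p' acc := by
  rw [goB, dif_pos h]
  split
  · simp_all
  · rename_i tok p2 heq
    rw [hm] at heq
    simp only [Option.some.injEq, Prod.mk.injEq] at heq
    obtain ⟨h1, h2⟩ := heq
    subst h2
    cases h1
    rfl

lemma goB_step_tok (cs : List Char) (pos p' : Nat) (t : String × String)
    (acc : List (String × String))
    (h : pos < cs.length) (hm : matchAtB cs pos = some (some t, p')) :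
    goB cs pos acc = goB cs p' (acc ++ [t]) := by
  rw [goB, dif_pos h]
  split
  · simp_all
  · rename_i tok p2 heq
    rw [hm] at heq
    simp only [Option.some.injEq, Prod.mk.injEq] at heq
    obtain ⟨h1, h2⟩ := heq
    subst h2
    cases h1
    rfl

-- the master pattern's value in each situation
lemma mB_ws (cs : List Char) (pos : Nat) (h : pos < cs.length)
    (hws : PySem.Chars.isspace cs[pos] = true) :
    matchAtB cs pos = some (none, pos + 1 +
      ((cs.drop (pos + 1)).takeWhile (fun c => PySem.Chars.isspace c)).length) := by
  unfold matchAtB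
  rw [← List.getElem_cons_drop h]
  simp only [List.takeWhile_cons, hws, if_pos, List.length_cons]
  simp
  omega

lemma tw_ws_nil (cs : List Char) (pos : Nat) (h : pos < cs.length)
    (hws : PySem.Chars.isspace cs[pos] = false) :
    (cs.drop pos).takeWhile (fun c => PySem.Chars.isspace c) = [] := by
  rw [← List.getElem_cons_drop h]
  simp [List.takeWhile_cons, hws]

lemma mB_op (cs : List Char) (pos : Nat) (h : pos < cs.length)
    (hws : PySem.Chars.isspace cs[pos] = false) :
    matchAtB cs pos =
      (if PySem.Chars.startswith (cs.drop pos) ['$','N','O','T'] then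
        some (some ("OPERATOR", "$NOT"), pos + 4)
      else if PySem.Chars.startswith (cs.drop pos) ['$','A','N','D'] then
        some (some ("OPERATOR", "$AND"), pos + 4)
      else if PySem.Chars.startswith (cs.drop pos) ['$','O','R'] then
        some (some ("OPERATOR", "$OR"), pos + 3)
      else
        match (cs.drop pos).head? with
        | some '(' => some (some ("LPAREN", "("), pos + 1)
        | some ')' => some (some ("RPAREN", ")"), pos + 1)
        | some ',' => some (some ("COMMA", ","), pos + 1)
        | some '?' =>
          let body := (cs.drop pos).tail.takeWhile (fun d => d ≠ '?')
          if body.length < (cs.drop pos).tail.length then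
            some (some ("CONDITION", String.ofList (PySem.Chars.strip body)),
                  pos + 2 + body.length)
          else none
        | _ => none) := by
  simp only [matchAtB]
  rw [tw_ws_nil cs pos h hws]
  simp


-- goB absorbs one whitespace character (the \\s+ run and the per-char skip land alike)
lemma goB_ws (cs : List Char) (pos : Nat) (acc : List (String × String))
    (h : pos < cs.length) (hws : PySem.Chars.isspace cs[pos] = true) :
    goB cs pos acc = goB cs (pos + 1) acc := by
  rw [goB_step_none cs pos _ acc h (mB_ws cs pos h hws)]
  cases hd2 : cs.drop (pos + 1) with
  | nil => simp
  | cons d r2 =>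
    by_cases hd : PySem.Chars.isspace d = true
    · have hlen : pos + 1 < cs.length := by
        have := congrArg List.length hd2
        simp only [List.length_drop, List.length_cons] at this
        omega
      have hget : cs[pos + 1] = d := by
        have hcd := List.getElem_cons_drop hlen
        rw [hd2] at hcd
        exact (List.cons.injEq _ _ _ _ ▸ hcd).1
      have htail : cs.drop (pos + 2) = r2 := by
        have hcd := List.getElem_cons_drop hlen
        rw [hd2] at hcd
        exact (List.cons.injEq _ _ _ _ ▸ hcd).2
      rw [goB_step_none cs (pos + 1) _ acc hlen (mB_ws cs (pos + 1) hlen (hget ▸ hd))]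
      rw [show pos + 1 + 1 = pos + 2 by omega, htail, List.takeWhile_cons, if_pos hd]
      congr 1
      simp
      omega
    · rw [List.takeWhile_cons, if_neg (by simp [hd])]
      simp

-- find.go with pattern ['?'] returns the length of the '?'-free prefix (offset by k)
lemma find_go_q (l : List Char) : ∀ k : Nat,
    PySem.Chars.find.go ['?'] l k =
      if (l.takeWhile (fun d => d ≠ '?')).length < l.length then
        ((k + (l.takeWhile (fun d => d ≠ '?')).length : Nat) : Int)
      else -1 := by
  induction l with
  | nil => intro k; simp [PySem.Chars.find.go]
  | cons hd t ih =>
    intro k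
    rw [PySem.Chars.find.go]
    by_cases hq : hd = '?'
    · subst hq
      simp [List.isPrefixOf]
    · have hpre : ['?'].isPrefixOf (hd :: t) = false := by
        simp only [List.isPrefixOf, List.isPrefixOf.eq_def, Bool.and_eq_false_iff,
          beq_eq_false_iff_ne, ne_eq]
        simp [eq_comm, hq]
      rw [hpre]
      simp only [Bool.false_eq_true, if_false]
      rw [ih (k + 1)]
      have htw : List.takeWhile (fun d => decide (d ≠ '?')) (hd :: t)
          = hd :: List.takeWhile (fun d => decide (d ≠ '?')) t := by
        simp [List.takeWhile_cons, hq]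
      rw [htw]
      simp only [List.length_cons]
      split_ifs with h1 h2 <;> omega

lemma find_q (l : List Char) :
    PySem.Chars.find l ['?'] =
      if (l.takeWhile (fun d => d ≠ '?')).length < l.length then
        (((l.takeWhile (fun d => d ≠ '?')).length : Nat) : Int)
      else -1 := by
  unfold PySem.Chars.find
  rw [find_go_q l 0]
  simp

-- the heart of the proof: from any position whose suffix the DFA accepts, the
-- per-character loop of A and the master-pattern loop of B produce the same tokens
lemma goA_eq_goB (cs : List Char) : ∀ (n pos : Nat) (acc : List (String × String)),
    cs.length - pos ≤ n → tkOk TkSt.normal (cs.drop pos) = true →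
    goA cs pos acc = goB cs pos acc := by
  intro n
  induction n with
  | zero =>
    intro pos acc hle _
    have h : ¬ pos < cs.length := by omega
    rw [goA, dif_neg h, goB, dif_neg h]
  | succ n ih =>
    intro pos acc hle hok
    by_cases h : pos < cs.length
    · have hdrop : cs.drop pos = cs[pos] :: cs.drop (pos + 1) :=
        (List.getElem_cons_drop h).symm
      rw [hdrop] at hok
      have hok2 : (match tkStep TkSt.normal cs[pos] with
          | none => false
          | some st' => tkOk st' (cs.drop (pos + 1))) = true := hok
      rw [goA, dif_pos h]
      by_cases hws : PySem.Chars.isspace cs[pos] = true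
      · rw [if_pos hws]
        have hok' : tkOk TkSt.normal (cs.drop (pos + 1)) = true := by
          rw [show tkStep TkSt.normal cs[pos] = some TkSt.normal by
            simp only [tkStep]; rw [if_pos (by simp [hws])]] at hok2
          exact hok2
        rw [ih (pos + 1) acc (by omega) hok']
        exact (goB_ws cs pos acc h hws).symm
      · rw [if_neg hws]
        have hws' : PySem.Chars.isspace cs[pos] = false := by simpa using hws
        have hmop := mB_op cs pos h hws'
        have hhead : (cs.drop pos).head? = some cs[pos] := by rw [hdrop]; rfl
        have htail : (cs.drop pos).tail = cs.drop (pos + 1) := by rw [hdrop]; rfl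
        by_cases h1 : PySem.Chars.startswith (cs.drop pos) ['$','N','O','T'] = true
        · rw [if_pos h1]
          rw [if_pos h1] at hmop
          have hc : cs[pos] = '$' := by
            rw [hdrop] at h1
            simp [PySem.Chars.startswith, List.isPrefixOf] at h1
            exact h1.1.symm
          have h1' : PySem.Chars.startswith (cs.drop (pos + 1)) ['N','O','T'] = true := by
            have h1c := hdrop ▸ h1
            rw [hc] at h1c
            simpa [PySem.Chars.startswith, List.isPrefixOf] using h1c
          have hokD : tkOk TkSt.afterDollar (cs.drop (pos + 1)) = true := by
            rw [show tkStep TkSt.normal cs[pos] = some TkSt.afterDollar by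
              rw [hc]; decide] at hok2
            exact hok2
          rw [tkOk_afterDollar, if_pos h1'] at hokD
          rw [goB_step_tok cs pos (pos + 4) _ acc h hmop]
          refine ih (pos + 4) _ (by omega) ?_
          rw [show cs.drop (pos + 4) = (cs.drop (pos + 1)).drop 3 by
            rw [List.drop_drop]]
          exact hokD
        · rw [if_neg h1]
          rw [if_neg h1] at hmop
          have h1' : ∀ (hcc : cs[pos] = '$'),
              PySem.Chars.startswith (cs.drop (pos + 1)) ['N','O','T'] = false := by
            intro hcc
            rcases hx : PySem.Chars.startswith (cs.drop (pos + 1)) ['N','O','T'] with _ | _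
            · rfl
            · have hxx : PySem.Chars.startswith (List.drop pos cs) ['$','N','O','T'] = true := by
                  rw [hdrop, hcc]
                  simpa [PySem.Chars.startswith, List.isPrefixOf] using hx
              exact absurd hxx h1
          by_cases h2 : PySem.Chars.startswith (cs.drop pos) ['$','A','N','D'] = true
          · rw [if_pos h2]
            rw [if_pos h2] at hmop
            have hc : cs[pos] = '$' := by
              rw [hdrop] at h2
              simp [PySem.Chars.startswith, List.isPrefixOf] at h2
              exact h2.1.symm
            have h2' : PySem.Chars.startswith (cs.drop (pos + 1)) ['A','N','D'] = true := by
              have h2c := hdrop ▸ h2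
              rw [hc] at h2c
              simpa [PySem.Chars.startswith, List.isPrefixOf] using h2c
            have hokD : tkOk TkSt.afterDollar (cs.drop (pos + 1)) = true := by
              rw [show tkStep TkSt.normal cs[pos] = some TkSt.afterDollar by
                rw [hc]; decide] at hok2
              exact hok2
            rw [tkOk_afterDollar, if_neg (by simp [h1' hc]), if_pos h2'] at hokD
            rw [goB_step_tok cs pos (pos + 4) _ acc h hmop]
            refine ih (pos + 4) _ (by omega) ?_
            rw [show cs.drop (pos + 4) = (cs.drop (pos + 1)).drop 3 by
              rw [List.drop_drop]]
            exact hokD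
          · rw [if_neg h2]
            rw [if_neg h2] at hmop
            have h2' : ∀ (hcc : cs[pos] = '$'),
                PySem.Chars.startswith (cs.drop (pos + 1)) ['A','N','D'] = false := by
              intro hcc
              rcases hx : PySem.Chars.startswith (cs.drop (pos + 1)) ['A','N','D'] with _ | _
              · rfl
              · have hxx : PySem.Chars.startswith (List.drop pos cs) ['$','A','N','D'] = true := by
                    rw [hdrop, hcc]
                    simpa [PySem.Chars.startswith, List.isPrefixOf] using hx
                exact absurd hxx h2
            by_cases h3 : PySem.Chars.startswith (cs.drop pos) ['$','O','R'] = true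
            · rw [if_pos h3]
              rw [if_pos h3] at hmop
              have hc : cs[pos] = '$' := by
                rw [hdrop] at h3
                simp [PySem.Chars.startswith, List.isPrefixOf] at h3
                exact h3.1.symm
              have h3' : PySem.Chars.startswith (cs.drop (pos + 1)) ['O','R'] = true := by
                have h3c := hdrop ▸ h3
                rw [hc] at h3c
                simpa [PySem.Chars.startswith, List.isPrefixOf] using h3c
              have hokD : tkOk TkSt.afterDollar (cs.drop (pos + 1)) = true := by
                rw [show tkStep TkSt.normal cs[pos] = some TkSt.afterDollar by
                  rw [hc]; decide] at hok2
                exact hok2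
              rw [tkOk_afterDollar, if_neg (by simp [h1' hc]),
                if_neg (by simp [h2' hc]), if_pos h3'] at hokD
              rw [goB_step_tok cs pos (pos + 3) _ acc h hmop]
              refine ih (pos + 3) _ (by omega) ?_
              rw [show cs.drop (pos + 3) = (cs.drop (pos + 1)).drop 2 by
                rw [List.drop_drop]]
              exact hokD
            · rw [if_neg h3]
              rw [if_neg h3, hhead] at hmop
              have h3' : ∀ (hcc : cs[pos] = '$'),
                  PySem.Chars.startswith (cs.drop (pos + 1)) ['O','R'] = false := by
                intro hcc
                rcases hx : PySem.Chars.startswith (cs.drop (pos + 1)) ['O','R'] with _ | _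
                · rfl
                · have hxx : PySem.Chars.startswith (List.drop pos cs) ['$','O','R'] = true := by
                      rw [hdrop, hcc]
                      simpa [PySem.Chars.startswith, List.isPrefixOf] using hx
                  exact absurd hxx h3
              by_cases hp : cs[pos] = '('
              · rw [if_pos hp]
                rw [hp] at hmop
                have hok' : tkOk TkSt.normal (cs.drop (pos + 1)) = true := by
                  rw [show tkStep TkSt.normal cs[pos] = some TkSt.normal by
                    rw [hp]; decide] at hok2
                  exact hok2
                rw [goB_step_tok cs pos (pos + 1) _ acc h hmop]
                exact ih (pos + 1) _ (by omega) hok'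
              · rw [if_neg hp]
                by_cases hr : cs[pos] = ')'
                · rw [if_pos hr]
                  rw [hr] at hmop
                  have hok' : tkOk TkSt.normal (cs.drop (pos + 1)) = true := by
                    rw [show tkStep TkSt.normal cs[pos] = some TkSt.normal by
                      rw [hr]; decide] at hok2
                    exact hok2
                  rw [goB_step_tok cs pos (pos + 1) _ acc h hmop]
                  exact ih (pos + 1) _ (by omega) hok'
                · rw [if_neg hr]
                  by_cases hcm : cs[pos] = ','
                  · rw [if_pos hcm]
                    rw [hcm] at hmop
                    have hok' : tkOk TkSt.normal (cs.drop (pos + 1)) = true := by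
                      rw [show tkStep TkSt.normal cs[pos] = some TkSt.normal by
                        rw [hcm]; decide] at hok2
                      exact hok2
                    rw [goB_step_tok cs pos (pos + 1) _ acc h hmop]
                    exact ih (pos + 1) _ (by omega) hok'
                  · rw [if_neg hcm]
                    by_cases hq : cs[pos] = '?'
                    · rw [if_pos hq]
                      rw [hq, htail] at hmop
                      have hokC : tkOk TkSt.inCond (cs.drop (pos + 1)) = true := by
                        rw [show tkStep TkSt.normal cs[pos] = some TkSt.inCond by
                          rw [hq]; decide] at hok2
                        exact hok2
                      rw [tkOk_inCond] at hokC
                      simp only [] at hmop hokC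
                      by_cases hb : ((cs.drop (pos + 1)).takeWhile
                          (fun d => d ≠ '?')).length < (cs.drop (pos + 1)).length
                      · rw [if_pos hb] at hmop hokC
                        have hk : pos + 1 ≤ cs.length := by omega
                        have hcast : ((pos : Int) + 1) = ((pos + 1 : Nat) : Int) := by
                          push_cast; ring
                        have he : PySem.Chars.findFrom cs ['?'] ((pos : Int) + 1) none =
                            ((pos + 1 + ((cs.drop (pos + 1)).takeWhile
                              (fun d => d ≠ '?')).length : Nat) : Int) := by
                          rw [hcast, PySem.Chars.findFrom_natCast cs ['?'] (pos + 1) hk,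
                            find_q, if_pos hb]
                          rw [if_neg (by omega)]
                          push_cast; ring
                        simp only [he]
                        rw [dif_neg (by omega)]
                        have htake : (cs.drop (pos + 1)).take ((cs.drop (pos + 1)).takeWhile
                            (fun d => d ≠ '?')).length
                            = (cs.drop (pos + 1)).takeWhile (fun d => d ≠ '?') :=
                          (List.prefix_iff_eq_take.mp (List.takeWhile_prefix _)).symm
                        have hslice : PySem.List.slice cs (some ((pos : Int) + 1))
                            (some ((pos + 1 + ((cs.drop (pos + 1)).takeWhile
                              (fun d => d ≠ '?')).length : Nat) : Int))
                            = (cs.drop (pos + 1)).takeWhile (fun d => d ≠ '?') := by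
                          rw [hcast, PySem.List.slice_natCast]
                          rw [show pos + 1 + ((cs.drop (pos + 1)).takeWhile
                            (fun d => d ≠ '?')).length - (pos + 1)
                            = ((cs.drop (pos + 1)).takeWhile (fun d => d ≠ '?')).length
                            by omega]
                          exact htake
                        rw [hslice]
                        rw [goB_step_tok cs pos _ _ acc h hmop]
                        rw [show (((pos + 1 + ((cs.drop (pos + 1)).takeWhile
                          (fun d => d ≠ '?')).length : Nat) : Int)).toNat + 1
                          = pos + 2 + ((cs.drop (pos + 1)).takeWhile
                            (fun d => d ≠ '?')).length by omega]
                        refine ih _ _ (by omega) ?_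
                        rw [show cs.drop (pos + 2 + ((cs.drop (pos + 1)).takeWhile
                          (fun d => d ≠ '?')).length)
                          = (cs.drop (pos + 1)).drop (((cs.drop (pos + 1)).takeWhile
                            (fun d => d ≠ '?')).length + 1) by
                          rw [List.drop_drop]; congr 1; omega]
                        exact hokC
                      · rw [if_neg hb] at hokC
                        exact absurd hokC (by simp)
                    · rw [if_neg hq]
                      by_cases hdl : cs[pos] = '$'
                      · have hokD : tkOk TkSt.afterDollar (cs.drop (pos + 1)) = true := by
                          rw [show tkStep TkSt.normal cs[pos] = some TkSt.afterDollar by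
                            rw [hdl]; decide] at hok2
                          exact hok2
                        rw [tkOk_afterDollar, if_neg (by simp [h1' hdl]),
                          if_neg (by simp [h2' hdl]), if_neg (by simp [h3' hdl])] at hokD
                        exact absurd hokD (by simp)
                      · rw [show tkStep TkSt.normal cs[pos] = none by
                          simp only [tkStep]
                          rw [if_neg (by simp [hws', hp, hr, hcm]),
                            if_neg (by simp [hdl]), if_neg (by simp [hq])]] at hok2
                        exact absurd hok2 (by simp)
    · rw [goA, dif_neg h, goB, dif_neg h]

-- ===== VERDICT (by name: the statement is the Claim_ definition above) =====
theorem logical_tokenize_spec : Claim_equal_logical_tokenize := by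
  intro input_str _ hpre
  unfold Spec_logical_tokenize logical_tokenize logical_tokenize_alt
  refine goA_eq_goB input_str.toList input_str.toList.length 0 [] (by omega) ?_
  rw [List.drop_zero]
  exact hpre
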